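-- pv_equiv track=rewrite | github.com/easyDong19/CodingTest | 코딩테스트입문/숨어있는숫자의덧셈(2).py | solution
-- ===== SOURCE A (Python) =====
-- def solution(my_string):
--     my_string += "a"
--     answer = 0
--     num =""
--     for word in my_string:
--         if word.isdigit():
--             num += word
--         else:
--             if num != "":
--                 answer += int(num)
--                 num = ""
--
--
--     return answer
-- ===== SOURCE B (Python) =====
-- def solution(my_string):
--     # Two-pointer scan: locate each maximal digit run and convert it in one slice.
--     total = 0
--     i = 0
--     n = len(my_string)
--     while i < n:
--         if my_string[i].isdigit():
--             j = i
--             while j < n and my_string[j].isdigit():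
--                 j += 1
--             total += int(my_string[i:j])
--             i = j
--         else:
--             i += 1
--     return total
-- ===== Notes on version B (the rewrite author's own statement) =====
-- stated objective: simpler
-- what changed: Replaces A's appended sentinel character and running string accumulator with a direct two-pointer scan that slices each maximal digit run and converts it once.
import Mathlib
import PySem

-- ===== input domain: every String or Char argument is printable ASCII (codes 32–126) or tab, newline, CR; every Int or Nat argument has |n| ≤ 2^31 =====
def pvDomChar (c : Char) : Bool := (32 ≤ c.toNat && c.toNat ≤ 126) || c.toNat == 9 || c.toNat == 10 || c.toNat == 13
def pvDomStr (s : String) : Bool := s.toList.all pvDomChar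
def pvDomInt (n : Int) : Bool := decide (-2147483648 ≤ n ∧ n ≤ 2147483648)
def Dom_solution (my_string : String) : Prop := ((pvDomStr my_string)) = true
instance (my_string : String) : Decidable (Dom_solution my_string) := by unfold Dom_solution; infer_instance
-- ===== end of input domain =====

-- B replaces A's appended sentinel character and running string accumulator with a two-pointer
-- scan over maximal digit runs (objective: simpler).

-- ===== PORT A =====
-- A's loop state: (answer, num); int(num) is only reached with num a nonempty digit string.
def solStepA (st : Int × List Char) (w : Char) : Int × List Char :=
  if PySem.Chars.isdigit w then (st.1, st.2 ++ [w])
  else if st.2 ≠ [] then (st.1 + (PySem.Int.ofChars? st.2).getD 0, [])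
  else st

def solution (my_string : String) : Int :=
  -- my_string += "a"
  let s := my_string ++ "a"
  (s.toList.foldl solStepA (0, [])).1

-- ===== PORT B =====
-- the inner `while j < n and isdigit` run detection = takeWhile/dropWhile on the rest
def solRunsB : List Char → Int
  | [] => 0
  | c :: cs =>
    if PySem.Chars.isdigit c then
      ((PySem.Int.ofChars? (c :: cs.takeWhile PySem.Chars.isdigit)).getD 0)
        + solRunsB (cs.dropWhile PySem.Chars.isdigit)
    else
      solRunsB cs
termination_by cs => cs.length
decreasing_by
  · simpa using Nat.lt_succ_of_le (List.length_dropWhile_le _ _)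
  · simp

def solution_alt (my_string : String) : Int := solRunsB my_string.toList

-- ===== PRECONDITION & SPEC =====
def Spec_solution (my_string : String) (out : Int) : Prop := out = solution_alt my_string
instance (my_string : String) (out : Int) : Decidable (Spec_solution my_string out) := by unfold Spec_solution; infer_instance

-- ===== CLAIM (what is proved, stated in full; the proofs are below) =====
def Claim_equal_solution : Prop := ∀ (my_string : String), Dom_solution my_string → Spec_solution my_string (solution my_string)

-- ===== LEMMAS AND PROOFS =====

-- fold invariant: with pending digit buffer `num`, finishing the input (plus the
-- sentinel 'a') yields ans + (pending run completed by cs's leading digits) + runs of the rest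
theorem solFold_inv (cs : List Char) : ∀ (ans : Int) (num : List Char),
    (List.foldl solStepA (ans, num) (cs ++ ['a'])).1
      = ans + (if num = [] then solRunsB cs
               else (PySem.Int.ofChars? (num ++ cs.takeWhile PySem.Chars.isdigit)).getD 0
                    + solRunsB (cs.dropWhile PySem.Chars.isdigit)) := by
  induction cs with
  | nil =>
    intro ans num
    simp only [List.nil_append, List.foldl_cons, List.foldl_nil]
    have ha : PySem.Chars.isdigit 'a' = false := by decide
    by_cases h : num = []
    · simp [solStepA, ha, h, solRunsB]
    · simp [solStepA, ha, h, solRunsB]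
  | cons c cs ih =>
    intro ans num
    simp only [List.cons_append, List.foldl_cons]
    by_cases hd : PySem.Chars.isdigit c
    · have hstep : solStepA (ans, num) c = (ans, num ++ [c]) := by
        simp [solStepA, hd]
      rw [hstep, ih]
      have hne : num ++ [c] ≠ [] := by simp
      by_cases h : num = []
      · subst h
        simp [hd, solRunsB]
      · simp [hd, hne, h, List.takeWhile, List.dropWhile]
    · have hd' : PySem.Chars.isdigit c = false := by simpa using hd
      by_cases h : num = []
      · have hstep : solStepA (ans, num) c = (ans, []) := by
          simp [solStepA, hd', h]
        rw [hstep, ih]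
        simp [h, solRunsB, hd']
      · have hstep : solStepA (ans, num) c
            = (ans + (PySem.Int.ofChars? num).getD 0, []) := by
          simp [solStepA, hd', h]
        rw [hstep, ih]
        simp [h, solRunsB, hd', List.takeWhile, List.dropWhile, add_assoc]

-- ===== VERDICT (by name: the statement is the Claim_ definition above) =====
theorem solution_spec : Claim_equal_solution := by
  intro s _
  unfold Spec_solution solution_alt
  show (List.foldl solStepA (0, []) (s ++ "a").toList).1 = _
  have h : (s ++ "a").toList = s.toList ++ ['a'] := by
    simp
  rw [h, solFold_inv]
  simp
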